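-- pv_equiv track=rewrite | github.com/aryachiranjeev/AI-1 | PA-2/P21CS007_P21AI002_M19DCS004.py | find_parent_nodes
-- ===== SOURCE A (Python) =====
-- def find_parent_nodes(dependencies,no_of_nodes):
--   dep = [[row[i] for row in dependencies] for i in range(len(dependencies[0]))]
--   dependency_list_for_each_node = []
--
--   no_of_depen_for_each_node = []
--   for i in range(no_of_nodes):
--       parents = []
--       count = 0
--       for j in range(no_of_nodes):
--           if  dep[i][j]== 1:
--               count+=1
--               parents.append(j)
--       no_of_depen_for_each_node.append(count)
--       dependency_list_for_each_node.append(parents)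
--
--
--
--   return dependency_list_for_each_node, no_of_depen_for_each_node
-- ===== SOURCE B (Python) =====
-- def find_parent_nodes(dependencies, no_of_nodes):
--     # Edge-list + grouping: flatten the matrix into (target, source) edges once,
--     # group them in a dict keyed by target, and derive the counts as list lengths.
--     edges = [(i, j) for j in range(no_of_nodes)
--                     for i, v in enumerate(dependencies[j][:no_of_nodes]) if v == 1]
--     parent_map = {}
--     for i, j in edges:
--         parent_map[i] = parent_map.get(i, []) + [j]
--     parents = [parent_map.get(i, []) for i in range(no_of_nodes)]
--     return parents, [len(p) for p in parents]
-- ===== Notes on version B (the rewrite author's own statement) =====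
-- stated objective: alternative
-- what changed: B replaces A's transpose-then-gather-per-node (with an explicit running count) by flattening the matrix into an edge list, grouping the edges into a dict keyed by target node, and reading the counts off as list lengths.
import Mathlib
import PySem

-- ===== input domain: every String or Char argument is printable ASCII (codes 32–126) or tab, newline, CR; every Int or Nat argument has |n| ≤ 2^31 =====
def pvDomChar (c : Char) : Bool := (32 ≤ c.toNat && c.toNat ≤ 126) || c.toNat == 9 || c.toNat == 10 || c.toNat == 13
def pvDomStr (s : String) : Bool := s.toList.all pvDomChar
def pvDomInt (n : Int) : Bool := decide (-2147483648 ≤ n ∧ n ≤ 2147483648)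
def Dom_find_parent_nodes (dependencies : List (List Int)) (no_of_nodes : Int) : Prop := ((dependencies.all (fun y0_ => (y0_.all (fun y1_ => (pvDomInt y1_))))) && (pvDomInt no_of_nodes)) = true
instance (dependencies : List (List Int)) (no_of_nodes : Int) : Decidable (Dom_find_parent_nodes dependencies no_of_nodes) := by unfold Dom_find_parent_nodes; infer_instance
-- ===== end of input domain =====

-- B replaces A's transpose + per-node gather (with a running count) by an edge list grouped
-- into a dict keyed by target node, counts read off as list lengths; objective: alternative.

-- ===== PORT A =====
-- dep = [[row[i] for row in dependencies] for i in range(len(dependencies[0]))]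
def pvDep (dependencies : List (List Int)) : List (List Int) :=
  (List.range (PySem.List.pyGetD dependencies 0 []).length).map
    (fun (i : Nat) => dependencies.map (fun row => PySem.List.pyGetD row (i : Int) 0))

def find_parent_nodes (dependencies : List (List Int)) (no_of_nodes : Int) : List (List Int) × List Int :=
  (PySem.List.pyRange 0 no_of_nodes 1).foldl
    (fun acc i =>
      let pc := (PySem.List.pyRange 0 no_of_nodes 1).foldl
        (fun pc j =>
          if PySem.List.pyGetD (PySem.List.pyGetD (pvDep dependencies) i []) j 0 == 1 then
            (pc.1 ++ [j], pc.2 + 1)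
          else pc)
        (([] : List Int), (0 : Int))
      (acc.1 ++ [pc.1], acc.2 ++ [pc.2]))
    (([] : List (List Int)), ([] : List Int))

-- ===== PORT B =====
-- edges = [(i, j) for j in range(no_of_nodes) for i, v in enumerate(dependencies[j][:no_of_nodes]) if v == 1]
def pvEdges (dependencies : List (List Int)) (no_of_nodes : Int) : List (Int × Int) :=
  (PySem.List.pyRange 0 no_of_nodes 1).flatMap (fun j =>
    ((PySem.List.enumerate
        (PySem.List.slice (PySem.List.pyGetD dependencies j []) none (some no_of_nodes))).filter
      (fun p => p.2 == 1)).map (fun p => (p.1, j)))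

def find_parent_nodes_alt (dependencies : List (List Int)) (no_of_nodes : Int) : List (List Int) × List Int :=
  let parent_map :=
    (pvEdges dependencies no_of_nodes).foldl
      (fun d p => d.modify p.1 ([] : List Int) (· ++ [p.2])) PySem.Dict.empty
  let parents := (PySem.List.pyRange 0 no_of_nodes 1).map (fun i => parent_map.getD i [])
  (parents, parents.map (fun p => (p.length : Int)))

-- ===== PRECONDITION & SPEC =====
-- Pre_ excludes exactly the inputs on which the Python A raises IndexError: an empty matrix
-- (dependencies[0]), a row shorter than the first row (the transpose comprehension), or
-- no_of_nodes exceeding the matrix's row count or the first row's length.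
def Pre_find_parent_nodes (dependencies : List (List Int)) (no_of_nodes : Int) : Prop :=
  dependencies ≠ [] ∧
  (∀ row ∈ dependencies, (dependencies.headD []).length ≤ row.length) ∧
  no_of_nodes ≤ (dependencies.length : Int) ∧
  no_of_nodes ≤ ((dependencies.headD []).length : Int)
instance (dependencies : List (List Int)) (no_of_nodes : Int) : Decidable (Pre_find_parent_nodes dependencies no_of_nodes) := by unfold Pre_find_parent_nodes; infer_instance

def pvWitness_find_parent_nodes : List (List Int) × Int := ([[0, 1], [1, 0]], 2)

def Spec_find_parent_nodes (dependencies : List (List Int)) (no_of_nodes : Int) (out : List (List Int) × List Int) : Prop := out = find_parent_nodes_alt dependencies no_of_nodes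
instance (dependencies : List (List Int)) (no_of_nodes : Int) (out : List (List Int) × List Int) : Decidable (Spec_find_parent_nodes dependencies no_of_nodes out) := by unfold Spec_find_parent_nodes; infer_instance

-- ===== CLAIM (what is proved, stated in full; the proofs are below) =====
def Claim_equal_find_parent_nodes : Prop := ∀ (dependencies : List (List Int)) (no_of_nodes : Int), Dom_find_parent_nodes dependencies no_of_nodes → Pre_find_parent_nodes dependencies no_of_nodes → Spec_find_parent_nodes dependencies no_of_nodes (find_parent_nodes dependencies no_of_nodes)

-- ===== LEMMAS AND PROOFS =====

-- the adjacency test both characterizations are phrased with: dependencies[j][i] == 1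
def pvTest (dependencies : List (List Int)) (i j : Int) : Bool :=
  PySem.List.pyGetD (PySem.List.pyGetD dependencies j []) i 0 == 1

-- a flatMap producing [x] or [] is a filter
lemma pv_flatMap_ite_singleton {α : Type} (l : List α) (p : α → Bool) :
    l.flatMap (fun x => if p x then [x] else []) = l.filter p := by
  induction l with
  | nil => rfl
  | cons x t ih => by_cases h : p x <;> simp [List.flatMap_cons, h, ih]

-- characterization of port A
lemma pv_a_char (deps : List (List Int)) (n : Int) :
    find_parent_nodes deps n
    = ((PySem.List.pyRange 0 n 1).map
         (fun i => (PySem.List.pyRange 0 n 1).filter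
           (fun j => PySem.List.pyGetD (PySem.List.pyGetD (pvDep deps) i []) j 0 == 1)),
       (PySem.List.pyRange 0 n 1).map
         (fun i => (((PySem.List.pyRange 0 n 1).filter
           (fun j => PySem.List.pyGetD (PySem.List.pyGetD (pvDep deps) i []) j 0 == 1)).length : Int))) := by
  unfold find_parent_nodes
  have hinner : ∀ i : Int,
      (PySem.List.pyRange 0 n 1).foldl
        (fun pc j =>
          if PySem.List.pyGetD (PySem.List.pyGetD (pvDep deps) i []) j 0 == 1 then
            (pc.1 ++ [j], pc.2 + 1)
          else pc)
        (([] : List Int), (0 : Int))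
      = ((PySem.List.pyRange 0 n 1).filter
           (fun j => PySem.List.pyGetD (PySem.List.pyGetD (pvDep deps) i []) j 0 == 1),
         (((PySem.List.pyRange 0 n 1).filter
           (fun j => PySem.List.pyGetD (PySem.List.pyGetD (pvDep deps) i []) j 0 == 1)).length : Int)) := by
    intro i
    rw [PySem.List.foldl_congr_mem _ _
      (fun pc j =>
        ((if PySem.List.pyGetD (PySem.List.pyGetD (pvDep deps) i []) j 0 == 1 then pc.1 ++ [j] else pc.1),
         (if PySem.List.pyGetD (PySem.List.pyGetD (pvDep deps) i []) j 0 == 1 then pc.2 + 1 else pc.2)))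
      _ (by
        intro acc x _
        by_cases hc : (PySem.List.pyGetD (PySem.List.pyGetD (pvDep deps) i []) x 0 == 1) = true <;>
          simp [hc])]
    rw [PySem.List.foldl_prod_mk
      (f := fun a j => if PySem.List.pyGetD (PySem.List.pyGetD (pvDep deps) i []) j 0 == 1 then a ++ [j] else a)
      (g := fun c j => if PySem.List.pyGetD (PySem.List.pyGetD (pvDep deps) i []) j 0 == 1 then c + 1 else c)]
    rw [PySem.List.foldl_append_if_eq_filter, PySem.List.foldl_if_add_one]
    simp [List.countP_eq_length_filter]
  simp only [hinner]
  rw [PySem.List.foldl_prod_mk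
    (f := fun a i => a ++ [(PySem.List.pyRange 0 n 1).filter
      (fun j => PySem.List.pyGetD (PySem.List.pyGetD (pvDep deps) i []) j 0 == 1)])
    (g := fun a i => a ++ [(((PySem.List.pyRange 0 n 1).filter
      (fun j => PySem.List.pyGetD (PySem.List.pyGetD (pvDep deps) i []) j 0 == 1)).length : Int)])]
  rw [PySem.List.foldl_append_singleton_eq_map, PySem.List.foldl_append_singleton_eq_map]
  simp

-- under Pre_, the j-th row's slice [:n] looked up at 0 ≤ i < n is dependencies[j][i]
lemma pv_slice_get (deps : List (List Int)) (n : Int)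
    (hpre : Pre_find_parent_nodes deps n) (j : Int) (hj : 0 ≤ j ∧ j < n)
    (i : Int) (hi : 0 ≤ i ∧ i < n) :
    PySem.List.pyGetD (PySem.List.slice (PySem.List.pyGetD deps j []) none (some n)) i 0
    = PySem.List.pyGetD (PySem.List.pyGetD deps j []) i 0 := by
  obtain ⟨N, rfl⟩ : ∃ N : Nat, n = (N : Int) := ⟨n.toNat, by omega⟩
  obtain ⟨hne, hrows, hlen, hm⟩ := hpre
  have hjlen : j < (deps.length : Int) := lt_of_lt_of_le hj.2 hlen
  have hrow : PySem.List.pyGetD deps j [] = deps[j.toNat]'(by omega) :=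
    PySem.List.pyGetD_eq_getElem deps [] hj.1 hjlen
  have hrlen : N ≤ (deps[j.toNat]'(by omega)).length := by
    have := hrows (deps[j.toNat]'(by omega)) (List.getElem_mem _)
    omega
  rw [hrow, PySem.List.slice_to_natCast]
  rw [PySem.List.pyGetD_eq_getElem _ 0 hi.1 (by simp [List.length_take]; omega),
      PySem.List.pyGetD_eq_getElem _ 0 hi.1 (by omega)]
  rw [List.getElem_take]

-- the per-source block of the edge list, restricted to target i, is [j] or []
lemma pv_block (deps : List (List Int)) (n : Int)
    (hpre : Pre_find_parent_nodes deps n) (i : Int) (hi : 0 ≤ i ∧ i < n)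
    (j : Int) (hj : 0 ≤ j ∧ j < n) :
    ((((PySem.List.enumerate
          (PySem.List.slice (PySem.List.pyGetD deps j []) none (some n))).filter
        (fun p => p.2 == 1)).map (fun p => (p.1, j))).filter
      (fun p => p.1 == i)).map (fun p => p.2)
    = if pvTest deps i j then [j] else [] := by
  obtain ⟨N, rfl⟩ : ∃ N : Nat, n = (N : Int) := ⟨n.toNat, by omega⟩
  have hlenx : PySem.List.len (PySem.List.slice (PySem.List.pyGetD deps j []) none (some (N : Int))) = (N : Int) := by
    obtain ⟨hne, hrows, hlen, hm⟩ := hpre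
    have hjlen : j < (deps.length : Int) := lt_of_lt_of_le hj.2 hlen
    have hrow : PySem.List.pyGetD deps j [] = deps[j.toNat]'(by omega) :=
      PySem.List.pyGetD_eq_getElem deps [] hj.1 hjlen
    have hrlen : N ≤ (deps[j.toNat]'(by omega)).length := by
      have := hrows (deps[j.toNat]'(by omega)) (List.getElem_mem _)
      omega
    rw [hrow, PySem.List.slice_to_natCast, PySem.List.len_eq]
    simp [List.length_take]
    omega
  rw [PySem.List.enumerate_eq_map_pyRange (d := 0), hlenx]
  simp only [List.filter_map, List.map_map, List.filter_filter, Function.comp_def]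
  have hsub : ∀ t ∈ PySem.List.pyRange 0 (N : Int) 1,
      ((t == i) &&
        (PySem.List.pyGetD (PySem.List.slice (PySem.List.pyGetD deps j []) none (some (N : Int))) t 0 == 1))
      = ((t == i) && pvTest deps t j) := by
    intro t ht
    obtain ⟨ht0, htn⟩ := (PySem.List.mem_pyRange_one).mp ht
    rw [pv_slice_get deps (N : Int) hpre j hj t ⟨ht0, htn⟩]
    rfl
  rw [List.filter_congr hsub]
  have hsplit : (PySem.List.pyRange 0 (N : Int) 1).filter (fun t => (t == i) && pvTest deps t j)
      = ((PySem.List.pyRange 0 (N : Int) 1).filter (fun t => t == i)).filter (fun t => pvTest deps t j) := by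
    rw [List.filter_filter]
    apply List.filter_congr
    intro t _
    rw [Bool.and_comm]
  have hone : (PySem.List.pyRange 0 (N : Int) 1).filter (fun t => t == i) = [i] := by
    rw [List.filter_beq]
    have hc : (PySem.List.pyRange 0 (N : Int) 1).count i = 1 :=
      List.count_eq_one_of_mem (PySem.List.nodup_pyRange_one 0 (N : Int))
        ((PySem.List.mem_pyRange_one).mpr ⟨hi.1, hi.2⟩)
    rw [hc]
    rfl
  rw [hsplit, hone]
  by_cases hc : pvTest deps i j <;> simp [List.filter, hc]

-- characterization of port B (under Pre_)
lemma pv_alt_char (deps : List (List Int)) (n : Int)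
    (hpre : Pre_find_parent_nodes deps n) :
    find_parent_nodes_alt deps n
    = ((PySem.List.pyRange 0 n 1).map
         (fun i => (PySem.List.pyRange 0 n 1).filter (fun j => pvTest deps i j)),
       (PySem.List.pyRange 0 n 1).map
         (fun i => (((PySem.List.pyRange 0 n 1).filter (fun j => pvTest deps i j)).length : Int))) := by
  unfold find_parent_nodes_alt
  have hparents : ∀ i ∈ PySem.List.pyRange 0 n 1,
      ((pvEdges deps n).foldl
        (fun d p => d.modify p.1 ([] : List Int) (· ++ [p.2])) PySem.Dict.empty).getD i []
      = (PySem.List.pyRange 0 n 1).filter (fun j => pvTest deps i j) := by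
    intro i hi
    obtain ⟨hi0, hin⟩ := (PySem.List.mem_pyRange_one).mp hi
    rw [PySem.Dict.getD_foldl_modify_append, PySem.Dict.getD_empty, List.nil_append]
    unfold pvEdges
    rw [List.filter_flatMap, List.map_flatMap]
    have hblocks : ∀ j ∈ PySem.List.pyRange 0 n 1,
        (((((PySem.List.enumerate
              (PySem.List.slice (PySem.List.pyGetD deps j []) none (some n))).filter
            (fun p => p.2 == 1)).map (fun p => (p.1, j))).filter
          (fun p => p.1 == i)).map (fun p => p.2))
        = if pvTest deps i j then [j] else [] := by
      intro j hj
      obtain ⟨hj0, hjn⟩ := (PySem.List.mem_pyRange_one).mp hj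
      exact pv_block deps n hpre i ⟨hi0, hin⟩ j ⟨hj0, hjn⟩
    calc (PySem.List.pyRange 0 n 1).flatMap
          (fun j => ((((PySem.List.enumerate
              (PySem.List.slice (PySem.List.pyGetD deps j []) none (some n))).filter
            (fun p => p.2 == 1)).map (fun p => (p.1, j))).filter
          (fun p => p.1 == i)).map (fun p => p.2))
        = (PySem.List.pyRange 0 n 1).flatMap (fun j => if pvTest deps i j then [j] else []) := by
          apply List.flatMap_congr
          intro j hj
          exact hblocks j hj
      _ = (PySem.List.pyRange 0 n 1).filter (fun j => pvTest deps i j) :=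
          pv_flatMap_ite_singleton _ _
  refine Prod.ext ?_ ?_
  · simp only []
    exact List.map_congr_left hparents
  · simp only [List.map_map]
    apply List.map_congr_left
    intro i hi
    simp only [Function.comp_apply]
    rw [hparents i hi]

-- under Pre_, A's lookup in the transpose equals B's direct lookup
lemma pv_bridge (deps : List (List Int)) (n : Int)
    (hpre : Pre_find_parent_nodes deps n) (i : Int) (hi : 0 ≤ i ∧ i < n)
    (j : Int) (hj : 0 ≤ j ∧ j < n) :
    (PySem.List.pyGetD (PySem.List.pyGetD (pvDep deps) i []) j 0 == 1)
    = pvTest deps i j := by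
  obtain ⟨hne, hrows, hlen, hm⟩ := hpre
  have hhead : (PySem.List.pyGetD deps 0 []).length = (deps.headD []).length := by
    rw [PySem.List.pyGetD_zero]
    cases deps with
    | nil => simp
    | cons a l => simp
  have htm : i.toNat < (PySem.List.pyGetD deps 0 []).length := by
    rw [hhead]; omega
  have hjlen : j < (deps.length : Int) := lt_of_lt_of_le hj.2 hlen
  have h1 : PySem.List.pyGetD (pvDep deps) i [] =
      deps.map (fun row => PySem.List.pyGetD row i 0) := by
    have hcast : i = ((i.toNat : Nat) : Int) := by omega
    rw [hcast, PySem.List.pyGetD_natCast]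
    unfold pvDep
    rw [List.getD_eq_getElem _ _ (by simpa using htm)]
    rw [List.getElem_map, List.getElem_range]
  have h2 : PySem.List.pyGetD deps j [] = deps[j.toNat]'(by omega) :=
    PySem.List.pyGetD_eq_getElem deps [] hj.1 hjlen
  unfold pvTest
  rw [h1, h2, PySem.List.pyGetD_eq_getElem _ 0 hj.1 (by simpa using hjlen)]
  simp only [List.getElem_map]

-- ===== VERDICT (by name: the statement is the Claim_ definition above) =====
theorem find_parent_nodes_spec : Claim_equal_find_parent_nodes := by
  intro deps n _ hpre
  unfold Spec_find_parent_nodes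
  rw [pv_a_char, pv_alt_char deps n hpre]
  have hfilter : ∀ i ∈ PySem.List.pyRange 0 n 1,
      (PySem.List.pyRange 0 n 1).filter
        (fun j => PySem.List.pyGetD (PySem.List.pyGetD (pvDep deps) i []) j 0 == 1)
      = (PySem.List.pyRange 0 n 1).filter (fun j => pvTest deps i j) := by
    intro i hi
    obtain ⟨hi0, hin⟩ := (PySem.List.mem_pyRange_one).mp hi
    apply List.filter_congr
    intro j hj
    obtain ⟨hj0, hjn⟩ := (PySem.List.mem_pyRange_one).mp hj
    exact pv_bridge deps n hpre i ⟨hi0, hin⟩ j ⟨hj0, hjn⟩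
  refine Prod.ext ?_ ?_ <;>
  · apply List.map_congr_left
    intro i hi
    rw [hfilter i hi]
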